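-- pv_equiv track=rewrite | github.com/Owlume/owlume-engine | scripts/learn_empathy_weights_v01.py | index_moves_by_cell
-- ===== SOURCE A (Python) =====
-- from typing import Dict, Any, Iterable, List, Tuple, Set
--
-- def cell_key(mode: str, principle: str) -> str:
--     return f"{mode} × {principle}"
--
-- def index_moves_by_cell(weights_arr: List[Dict[str, Any]]) -> Dict[str, List[int]]:
--     idx = {}
--     for i, move in enumerate(weights_arr):
--         mode = str(move.get("mode", "Unknown"))
--         principle = str(move.get("principle", "Unknown"))
--         cell = cell_key(mode, principle)
--         idx.setdefault(cell, []).append(i)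
--     return idx
-- ===== SOURCE B (Python) =====
-- def cell_key(mode: str, principle: str) -> str:
--     return f"{mode} × {principle}"
--
--
-- def index_moves_by_cell(weights_arr):
--     # Two-phase: extract all cell keys once, then build one dict entry per
--     # distinct key (first-seen order) by gathering its indices in a scan.
--     keys = [cell_key(str(m.get("mode", "Unknown")), str(m.get("principle", "Unknown")))
--             for m in weights_arr]
--     return {k: [i for i, k2 in enumerate(keys) if k2 == k]
--             for k in dict.fromkeys(keys)}
-- ===== Notes on version B (the rewrite author's own statement) =====
-- stated objective: alternative
-- what changed: Instead of one pass maintaining a dict of growing index lists via setdefault, B extracts the list of cell keys once, deduplicates it in first-seen order, and builds each group's index list by a comprehension over the enumerated key list.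
import Mathlib
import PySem

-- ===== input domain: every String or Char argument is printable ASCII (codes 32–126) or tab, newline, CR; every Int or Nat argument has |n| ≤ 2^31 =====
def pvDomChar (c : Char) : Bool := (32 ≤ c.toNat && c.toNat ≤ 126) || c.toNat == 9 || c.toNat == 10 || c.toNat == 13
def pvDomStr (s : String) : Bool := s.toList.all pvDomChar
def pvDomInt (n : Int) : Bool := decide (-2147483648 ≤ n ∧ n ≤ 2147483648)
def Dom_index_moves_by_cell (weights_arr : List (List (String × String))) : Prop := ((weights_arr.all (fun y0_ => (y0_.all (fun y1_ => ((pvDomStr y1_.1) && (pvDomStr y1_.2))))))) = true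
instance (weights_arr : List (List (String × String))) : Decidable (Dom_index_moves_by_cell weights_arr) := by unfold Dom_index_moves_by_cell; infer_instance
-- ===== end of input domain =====

-- B replaces A's single-pass setdefault-dict accumulation by a two-phase key-extraction
-- + dedup + per-key gather (objective: alternative decomposition, same results).


-- ===== PORT A =====
-- f"{mode} × {principle}"  (shared helper, as in the Python)
def cellKey (mode principle : String) : String :=
  PySem.Str.join "" [mode, " × ", principle]

-- str(move.get("mode","Unknown")) / str(move.get("principle","Unknown")); str on a str is identity
def moveKey (move : List (String × String)) : String :=
  cellKey ((PySem.Dict.mk move).getD "mode" "Unknown")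
          ((PySem.Dict.mk move).getD "principle" "Unknown")

-- idx.setdefault(cell, []).append(i)  =  idx[cell] = idx.get(cell, []) + [i]  =  Dict.modify
def index_moves_by_cell (weights_arr : List (List (String × String))) : List (String × List Int) :=
  ((PySem.List.enumerate weights_arr).foldl
    (fun d p => PySem.Dict.modify d (moveKey p.2) [] (fun l => l ++ [p.1]))
    PySem.Dict.empty).items

-- ===== PORT B =====
def index_moves_by_cell_alt (weights_arr : List (List (String × String))) : List (String × List Int) :=
  let keys := weights_arr.map moveKey
  (PySem.List.dedup keys).map (fun k =>
    (k, ((PySem.List.enumerate keys).filter (fun p => p.2 == k)).map (fun p => p.1)))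

-- ===== PRECONDITION & SPEC =====
def Spec_index_moves_by_cell (weights_arr : List (List (String × String))) (out : List (String × List Int)) : Prop := out = index_moves_by_cell_alt weights_arr
instance (weights_arr : List (List (String × String))) (out : List (String × List Int)) : Decidable (Spec_index_moves_by_cell weights_arr out) := by unfold Spec_index_moves_by_cell; infer_instance

-- ===== CLAIM (what is proved, stated in full; the proofs are below) =====
def Claim_equal_index_moves_by_cell : Prop := ∀ (weights_arr : List (List (String × String))), Dom_index_moves_by_cell weights_arr → Spec_index_moves_by_cell weights_arr (index_moves_by_cell weights_arr)

-- ===== LEMMAS AND PROOFS =====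

-- the group of indices of key k inside the key list ks
def pvGrp (ks : List String) (k : String) : List Int :=
  ((PySem.List.enumerate ks).filter (fun p => p.2 == k)).map (fun p => p.1)

lemma enumerate_map {α β : Type} (f : α → β) (xs : List α) (s : Int) :
    PySem.List.enumerate (xs.map f) s = (PySem.List.enumerate xs s).map (fun p => (p.1, f p.2)) := by
  induction xs generalizing s with
  | nil => simp [PySem.List.enumerate_nil]
  | cons x xs ih => simp [PySem.List.enumerate_cons, ih]

lemma pvGrp_append (ks : List String) (k k' : String) :
    pvGrp (ks ++ [k]) k' =
      if k' = k then pvGrp ks k' ++ [(ks.length : Int)] else pvGrp ks k' := by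
  unfold pvGrp
  rw [PySem.List.enumerate_append]
  simp [PySem.List.enumerate_cons]
  split_ifs with h
  · simp [h]
  · simp [Ne.symm h]

lemma pvGrp_nil_of_not_mem (ks : List String) (k : String) (h : k ∉ ks) :
    pvGrp ks k = [] := by
  unfold pvGrp
  rw [List.filter_eq_nil_iff.mpr, List.map_nil]
  intro p hp
  obtain ⟨j, hj, hp⟩ := (PySem.List.mem_enumerate_iff ks 0 p).1 hp
  subst hp
  simp only [beq_iff_eq]
  intro he
  exact h (he ▸ List.getElem_mem hj)

lemma dedup_append_singleton (ks : List String) (k : String) :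
    PySem.List.dedup (ks ++ [k]) =
      if k ∈ ks then PySem.List.dedup ks else PySem.List.dedup ks ++ [k] := by
  have h1 : PySem.List.dedup (ks ++ [k]) = PySem.Set.add (PySem.List.dedup ks) k := by
    simp [PySem.List.dedup_eq_ofList, PySem.Set.ofList_eq_foldl, List.foldl_append]
  rw [h1]
  unfold PySem.Set.add
  by_cases hk : k ∈ ks
  · simp [PySem.Set.contains, PySem.List.dedup_eq_ofList, PySem.Set.mem_ofList, hk]
  · simp [PySem.Set.contains, PySem.List.dedup_eq_ofList, PySem.Set.mem_ofList, hk]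

lemma main_group (ks : List String) :
    (PySem.List.enumerate ks).foldl
      (fun d p => PySem.Dict.modify d p.2 [] (fun l => l ++ [p.1]))
      PySem.Dict.empty
    = PySem.Dict.mk ((PySem.List.dedup ks).map (fun k => (k, pvGrp ks k))) := by
  induction ks using List.reverseRecOn with
  | nil => rfl
  | append_singleton ks k ih =>
    rw [PySem.List.enumerate_append, List.foldl_append, ih]
    simp only [PySem.List.enumerate_cons, PySem.List.enumerate_nil, List.foldl_cons,
      List.foldl_nil, zero_add]
    have hkeys : (PySem.Dict.mk ((PySem.List.dedup ks).map (fun k => (k, pvGrp ks k)))).keys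
        = PySem.List.dedup ks := by
      simp [PySem.Dict.keys_mk, Function.comp_def]
    have hcont : (PySem.Dict.mk ((PySem.List.dedup ks).map (fun k => (k, pvGrp ks k)))).contains k
        = decide (k ∈ ks) := by
      rw [PySem.Dict.contains_eq_decide_mem_keys, hkeys]
      simp
    apply PySem.Dict.ext
    simp only [PySem.Dict.modify]
    by_cases hk : k ∈ ks
    · have hmem : (k, pvGrp ks k) ∈ (PySem.List.dedup ks).map (fun k => (k, pvGrp ks k)) :=
        List.mem_map_of_mem ((PySem.List.mem_dedup ks k).2 hk)
      have hged : (PySem.Dict.mk ((PySem.List.dedup ks).map (fun k => (k, pvGrp ks k)))).getD k []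
          = pvGrp ks k :=
        PySem.Dict.getD_of_mem_items _ hmem (by rw [hkeys]; exact PySem.List.nodup_dedup ks) []
      rw [PySem.Dict.items_insert_of_contains _ _ (by rw [hcont]; simp [hk]), hged,
        dedup_append_singleton, if_pos hk]
      simp only [List.map_map]
      apply List.map_congr_left
      intro k' hk'
      by_cases h : k' = k
      · subst h
        simp [pvGrp_append]
      · simp [Function.comp, h, pvGrp_append]
    · have hged : (PySem.Dict.mk ((PySem.List.dedup ks).map (fun k => (k, pvGrp ks k)))).getD k []
          = [] :=
        PySem.Dict.getD_of_not_contains _ _ (by rw [hcont]; simp [hk])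
      rw [PySem.Dict.items_insert_of_not_contains _ _ (by rw [hcont]; simp [hk]), hged,
        dedup_append_singleton, if_neg hk, List.map_append]
      congr 1
      · apply List.map_congr_left
        intro k' hk'
        have h : k' ≠ k := fun he => hk (he ▸ (PySem.List.mem_dedup ks k').1 hk')
        simp [pvGrp_append, h]
      · simp [pvGrp_append, pvGrp_nil_of_not_mem ks k hk]

theorem index_moves_by_cell_spec : Claim_equal_index_moves_by_cell := by
  intro ws _
  unfold Spec_index_moves_by_cell index_moves_by_cell index_moves_by_cell_alt
  have h := main_group (ws.map moveKey)
  rw [enumerate_map, List.foldl_map] at h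
  calc (List.foldl (fun d p => PySem.Dict.modify d (moveKey p.2) [] fun l => l ++ [p.1])
          PySem.Dict.empty (PySem.List.enumerate ws)).items
      = (PySem.Dict.mk ((PySem.List.dedup (ws.map moveKey)).map
          (fun k => (k, pvGrp (ws.map moveKey) k)))).items := congrArg PySem.Dict.items h
    _ = _ := by simp [pvGrp]
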